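-- pv_equiv track=rewrite | github.com/jltx/conductor-memory | src/conductor_memory/search/verification.py | _extract_signals_from_tags
-- ===== SOURCE A (Python) =====
-- from typing import List, Optional, Dict, Any, Tuple
--
-- TAG_PREFIX_TO_EVIDENCE_TYPE: Dict[str, str] = {
--     "calls:": "call",
--     "reads:": "attribute_read",
--     "writes:": "attribute_write",
--     "subscript:": "subscript_access",
--     "param:": "parameter_usage",
-- }
--
-- def _extract_signals_from_tags(tags: List[str]) -> List[Tuple[str, str, str]]:
--     """
--     Extract signal information from chunk tags.
--
--     Args:
--         tags: List of tags (e.g., ["calls:iloc", "subscript:iloc", "param:bar_index"])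
--
--     Returns:
--         List of tuples: (evidence_type, signal_value, original_tag)
--     """
--     signals = []
--
--     for tag in tags:
--         for prefix, evidence_type in TAG_PREFIX_TO_EVIDENCE_TYPE.items():
--             if tag.startswith(prefix):
--                 signal_value = tag[len(prefix):]
--                 signals.append((evidence_type, signal_value, tag))
--                 break
--
--     return signals
-- ===== SOURCE B (Python) =====
-- from typing import List, Dict, Tuple, Optional
--
-- TAG_PREFIX_TO_EVIDENCE_TYPE: Dict[str, str] = {
--     "calls:": "call",
--     "reads:": "attribute_read",
--     "writes:": "attribute_write",
--     "subscript:": "subscript_access",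
--     "param:": "parameter_usage",
-- }
--
--
-- def _build_trie() -> dict:
--     """Character trie over the prefixes; a terminal node stores the evidence type under None."""
--     root: dict = {}
--     for prefix, evidence_type in TAG_PREFIX_TO_EVIDENCE_TYPE.items():
--         node = root
--         for ch in prefix:
--             node = node.setdefault(ch, {})
--         node[None] = evidence_type
--     return root
--
--
-- _PREFIX_TRIE = _build_trie()
--
--
-- def _match_trie(tag: str) -> Optional[Tuple[str, str, str]]:
--     """Walk the tag through the trie one character at a time."""
--     node = _PREFIX_TRIE
--     i = 0
--     while None not in node:
--         if i >= len(tag) or tag[i] not in node: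
--             return None
--         node = node[tag[i]]
--         i += 1
--     return (node[None], tag[i:], tag)
--
--
-- def _extract_signals_from_tags(tags: List[str]) -> List[Tuple[str, str, str]]:
--     signals = []
--     for tag in tags:
--         sig = _match_trie(tag)
--         if sig is not None:
--             signals.append(sig)
--     return signals
-- ===== Notes on version B (the rewrite author's own statement) =====
-- stated objective: faster
-- what changed: B builds a character trie (prefix DFA) from the prefix table once and matches each tag by walking it character-by-character through the trie, instead of A's inner loop testing startswith against every one of the five prefixes per tag.
import Mathlib
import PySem

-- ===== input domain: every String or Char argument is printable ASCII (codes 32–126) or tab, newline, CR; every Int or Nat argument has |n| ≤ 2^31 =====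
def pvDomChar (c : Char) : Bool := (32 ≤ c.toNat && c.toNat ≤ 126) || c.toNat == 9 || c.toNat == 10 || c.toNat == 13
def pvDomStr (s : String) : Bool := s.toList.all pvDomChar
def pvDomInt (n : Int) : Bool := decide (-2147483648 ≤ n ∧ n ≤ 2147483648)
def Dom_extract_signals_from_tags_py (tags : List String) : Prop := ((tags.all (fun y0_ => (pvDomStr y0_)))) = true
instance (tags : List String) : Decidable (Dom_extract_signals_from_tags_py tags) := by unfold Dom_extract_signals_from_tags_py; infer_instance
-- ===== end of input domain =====

-- B matches tags by walking a character trie built from the prefix table instead of A's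
-- startswith-scan over all five prefixes (objective: alternative; return values proved equal).

-- ===== PORT A =====
-- TAG_PREFIX_TO_EVIDENCE_TYPE in insertion order; keys as char lists (exact for these ASCII literals)
def pvPrefixes : List (List Char × String) :=
  [(['c','a','l','l','s',':'], "call"),
   (['r','e','a','d','s',':'], "attribute_read"),
   (['w','r','i','t','e','s',':'], "attribute_write"),
   (['s','u','b','s','c','r','i','p','t',':'], "subscript_access"),
   (['p','a','r','a','m',':'], "parameter_usage")]

-- A's inner 'for prefix, evidence_type in …: if tag.startswith(prefix): …; break'
-- tag[len(prefix):] with a nonnegative in-range start is exactly List.drop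
def pvScanA : List (List Char × String) → List Char → Option (String × String)
  | [], _ => none
  | (p, ev) :: rest, t =>
      if PySem.Chars.startswith t p then some (ev, String.ofList (t.drop p.length))
      else pvScanA rest t

def extract_signals_from_tags_py (tags : List String) : List (String × String × String) :=
  tags.foldl (fun signals tag =>
    match pvScanA pvPrefixes tag.toList with
    | some (ev, sv) => signals ++ [(ev, sv, tag)]
    | none => signals) []

-- ===== PORT B =====
-- a trie node: optional evidence type (the None entry of the Python dict) + child edges
mutual
inductive PvTrie where
  | mk : Option String → PvEdges → PvTrie
inductive PvEdges where
  | nil : PvEdges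
  | cons : Char → PvTrie → PvEdges → PvEdges
end

-- _build_trie: insert each prefix character by character (node.setdefault(ch, {}) = find-or-create edge)
mutual
def pvInsert : PvTrie → List Char → String → PvTrie
  | .mk _ es, [], ev => .mk (some ev) es
  | .mk v es, c :: p, ev => .mk v (pvInsertEdges es c p ev)
termination_by _tr p _ev => (p.length, 0)

def pvInsertEdges : PvEdges → Char → List Char → String → PvEdges
  | .nil, c, p, ev => .cons c (pvInsert (.mk none .nil) p ev) .nil
  | .cons d t rest, c, p, ev =>
      if d = c then .cons d (pvInsert t p ev) rest
      else .cons d t (pvInsertEdges rest c p ev)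
termination_by es _c p _ev => (p.length, sizeOf es + 1)
end

def pvBPrefixes : List (List Char × String) :=
  [(['c','a','l','l','s',':'], "call"),
   (['r','e','a','d','s',':'], "attribute_read"),
   (['w','r','i','t','e','s',':'], "attribute_write"),
   (['s','u','b','s','c','r','i','p','t',':'], "subscript_access"),
   (['p','a','r','a','m',':'], "parameter_usage")]

def pvTrieRoot : PvTrie :=
  pvBPrefixes.foldl (fun tr pe => pvInsert tr pe.1 pe.2) (.mk none .nil)

def pvFindEdge : PvEdges → Char → Option PvTrie
  | .nil, _ => none
  | .cons d t rest, c => if d = c then some t else pvFindEdge rest c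

-- _match_trie's while loop: stop at a terminal node, else follow the edge for the next char;
-- the returned list is the unconsumed remainder tag[i:]
def pvWalk : PvTrie → List Char → Option (String × List Char)
  | .mk (some ev) _, t => some (ev, t)
  | .mk none _, [] => none
  | .mk none es, c :: t =>
      match pvFindEdge es c with
      | some child => pvWalk child t
      | none => none

def extract_signals_from_tags_py_alt (tags : List String) : List (String × String × String) :=
  tags.foldl (fun signals tag =>
    match pvWalk pvTrieRoot tag.toList with
    | some (ev, rest) => signals ++ [(ev, String.ofList rest, tag)]
    | none => signals) []

-- ===== PRECONDITION & SPEC =====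
def Spec_extract_signals_from_tags_py (tags : List String) (out : List (String × String × String)) : Prop := out = extract_signals_from_tags_py_alt tags
instance (tags : List String) (out : List (String × String × String)) : Decidable (Spec_extract_signals_from_tags_py tags out) := by unfold Spec_extract_signals_from_tags_py; infer_instance

-- ===== CLAIM (what is proved, stated in full; the proofs are below) =====
def Claim_equal_extract_signals_from_tags_py : Prop := ∀ (tags : List String), Dom_extract_signals_from_tags_py tags → Spec_extract_signals_from_tags_py tags (extract_signals_from_tags_py tags)

-- ===== LEMMAS AND PROOFS =====

-- a linear chain trie for one remaining prefix
def pvChain : List Char → String → PvTrie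
  | [], ev => .mk (some ev) .nil
  | c :: p, ev => .mk none (.cons c (pvChain p ev) .nil)

-- the concrete trie: five disjoint chains hanging off the root (first chars are distinct)
theorem pv_root_eq : pvTrieRoot =
    .mk none (.cons 'c' (pvChain ['a','l','l','s',':'] "call")
      (.cons 'r' (pvChain ['e','a','d','s',':'] "attribute_read")
        (.cons 'w' (pvChain ['r','i','t','e','s',':'] "attribute_write")
          (.cons 's' (pvChain ['u','b','s','c','r','i','p','t',':'] "subscript_access")
            (.cons 'p' (pvChain ['a','r','a','m',':'] "parameter_usage") .nil))))) := by
  simp [pvTrieRoot, pvBPrefixes, pvChain, pvInsert, pvInsertEdges]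

theorem pv_walk_chain (p : List Char) (ev : String) (t : List Char) :
    pvWalk (pvChain p ev) t = if p.isPrefixOf t then some (ev, t.drop p.length) else none := by
  induction p generalizing t with
  | nil => simp [pvChain, pvWalk, List.isPrefixOf]
  | cons c p ih =>
      cases t with
      | nil => simp [pvChain, pvWalk, List.isPrefixOf]
      | cons d t' =>
          by_cases h : c = d
          · simp [pvChain, pvWalk, pvFindEdge, List.isPrefixOf, h, ih]
          · simp [pvChain, pvWalk, pvFindEdge, List.isPrefixOf, h]

theorem pv_startswith_eq (t p : List Char) :
    PySem.Chars.startswith t p = p.isPrefixOf t := by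
  rw [Bool.eq_iff_iff, PySem.Chars.startswith_iff, List.isPrefixOf_iff_prefix]

-- per tag, B's trie walk computes exactly A's prefix scan
theorem pv_walk_eq_scan (t : List Char) :
    (pvWalk pvTrieRoot t).map (fun er => (er.1, String.ofList er.2)) = pvScanA pvPrefixes t := by
  rw [pv_root_eq]
  cases t with
  | nil => decide
  | cons c t' =>
      by_cases h1 : c = 'c'
      · simp [pvScanA, pvPrefixes, pvWalk, pvFindEdge, pv_startswith_eq,
              List.isPrefixOf, pv_walk_chain, h1, apply_ite (Option.map _)]
      by_cases h2 : c = 'r'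
      · simp [pvScanA, pvPrefixes, pvWalk, pvFindEdge, pv_startswith_eq,
              List.isPrefixOf, pv_walk_chain, h2, apply_ite (Option.map _)]
      by_cases h3 : c = 'w'
      · simp [pvScanA, pvPrefixes, pvWalk, pvFindEdge, pv_startswith_eq,
              List.isPrefixOf, pv_walk_chain, h3, apply_ite (Option.map _)]
      by_cases h4 : c = 's'
      · simp [pvScanA, pvPrefixes, pvWalk, pvFindEdge, pv_startswith_eq,
              List.isPrefixOf, pv_walk_chain, h4, apply_ite (Option.map _)]
      by_cases h5 : c = 'p'
      · simp [pvScanA, pvPrefixes, pvWalk, pvFindEdge, pv_startswith_eq,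
              List.isPrefixOf, pv_walk_chain, h5, apply_ite (Option.map _)]
      · have h1' := Ne.symm h1
        have h2' := Ne.symm h2
        have h3' := Ne.symm h3
        have h4' := Ne.symm h4
        have h5' := Ne.symm h5
        simp [pvScanA, pvPrefixes, pvWalk, pvFindEdge, pv_startswith_eq,
              List.isPrefixOf, h1', h2', h3', h4', h5']

theorem pv_folds_eq (tags : List String) (acc : List (String × String × String)) :
    tags.foldl (fun signals tag =>
      match pvScanA pvPrefixes tag.toList with
      | some (ev, sv) => signals ++ [(ev, sv, tag)]
      | none => signals) acc =
    tags.foldl (fun signals tag =>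
      match pvWalk pvTrieRoot tag.toList with
      | some (ev, rest) => signals ++ [(ev, String.ofList rest, tag)]
      | none => signals) acc := by
  induction tags generalizing acc with
  | nil => rfl
  | cons tag rest ih =>
      simp only [List.foldl]
      rw [← pv_walk_eq_scan tag.toList]
      cases pvWalk pvTrieRoot tag.toList with
      | none => simpa using ih acc
      | some er =>
          obtain ⟨ev, r⟩ := er
          simpa using ih (acc ++ [(ev, String.ofList r, tag)])

-- ===== VERDICT (by name: the statement is the Claim_ definition above) =====
theorem extract_signals_from_tags_py_spec : Claim_equal_extract_signals_from_tags_py := by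
  intro tags _
  show extract_signals_from_tags_py tags = extract_signals_from_tags_py_alt tags
  unfold extract_signals_from_tags_py extract_signals_from_tags_py_alt
  exact pv_folds_eq tags []
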